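-- pv_equiv track=rewrite | github.com/chauhanswapnil/Coding-Challenges | KickStart/PalindromeFree.py | palindrome_free_strings_brute
-- ===== SOURCE A (Python) =====
-- import itertools
--
-- def palindrome_free_strings_brute(N,S):
--     ques_index = []
--     k = 0
--     for i in range(len(S)):
--         if S[i] == "?":
--             ques_index.append(i)
--             k+=1
--
--     for b in itertools.product([0, 1], repeat=k):
--         possible_str = S
--         for i in range(0, len(ques_index)):
--             possible_str = possible_str[:ques_index[i]] + str(b[i]) + possible_str[ques_index[i]+1:]
--
--         flag = 0
--         for i in range(len(possible_str)):
--             subStr = ""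
--             for j in range(i, len(possible_str)):
--                 subStr+=possible_str[j]
--                 if (len(subStr) >= 5 and checkPalindromeBrute(subStr)):
--                     flag = 1
--         if flag == 0:
--             return True
--
--     return False
--
-- def checkPalindromeBrute(S):
--     j = len(S) - 1
--     for i in S:
--         if i != S[j]:
--             return False
--         j-=1
--     return True
-- ===== SOURCE B (Python) =====
-- def palindrome_free_strings_brute(N, S):
--     # DP over positions: keep the set of possible last-5-character windows of
--     # palindrome-free fillings; a palindrome of length >= 5 exists iff a
--     # palindrome of length exactly 5 or 6 exists, so only those windows are checked.
--     states = {""}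
--     for c in S:
--         cands = "01" if c == "?" else c
--         nxt = set()
--         for st in states:
--             for x in cands:
--                 w = st + x
--                 if len(w) >= 5 and w[-5] == w[-1] and w[-4] == w[-2]:
--                     continue
--                 if len(w) >= 6 and w[0] == w[-1] and w[1] == w[-2] and w[2] == w[-3]:
--                     continue
--                 nxt.add(w[-5:])
--         states = nxt
--     return bool(states)
-- ===== Notes on version B (the rewrite author's own statement) =====
-- stated objective: faster
-- what changed: Replaced brute-force enumeration of all 2^k '?'-fillings with an O(N^2*substring-length) palindrome scan per filling by a left-to-right DP that keeps the set of feasible last-5-character windows and rejects only length-5 and length-6 palindromic windows (any palindrome of length >=5 contains one of length 5 or 6).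
import Mathlib
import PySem

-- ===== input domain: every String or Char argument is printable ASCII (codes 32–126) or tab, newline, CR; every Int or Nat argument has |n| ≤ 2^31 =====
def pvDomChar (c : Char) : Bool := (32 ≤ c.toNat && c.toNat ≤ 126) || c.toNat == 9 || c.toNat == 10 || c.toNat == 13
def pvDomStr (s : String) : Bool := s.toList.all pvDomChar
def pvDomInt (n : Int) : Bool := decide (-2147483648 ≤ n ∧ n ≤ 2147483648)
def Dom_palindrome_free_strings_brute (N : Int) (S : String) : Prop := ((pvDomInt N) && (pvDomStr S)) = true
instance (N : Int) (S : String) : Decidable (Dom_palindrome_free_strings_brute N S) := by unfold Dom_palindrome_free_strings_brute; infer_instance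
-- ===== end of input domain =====

-- B replaces A's brute-force enumeration of all '?'-fillings (checking every substring of
-- every candidate) by a left-to-right DP over the set of feasible last-5-character windows,
-- rejecting only length-5/6 palindromic windows; same return value, asymptotically faster.

-- ===== PORT A =====
-- checkPalindromeBrute: j runs len-1 down while i runs over the chars
def cpbGo (S : List Char) : List Char → Int → Bool
  | [], _ => true
  | i :: rest, j =>
    match PySem.List.pyGet? S j with
    | some c => if i ≠ c then false else cpbGo S rest (j - 1)
    | none => false   -- unreachable: j = len-1-position stays in range

def checkPalindromeBrute (S : List Char) : Bool := cpbGo S S ((S.length : Int) - 1)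

-- inner 'for j in range(i, len)' body: subStr += s[j]; flag := 1 on a long palindrome
def palSubstep (t : List Char) (p : List Char × Int) (j : Int) : List Char × Int :=
  let subStr := p.1 ++ [PySem.List.pyGetD t j ' ']
  (subStr, if 5 ≤ subStr.length ∧ checkPalindromeBrute subStr = true then 1 else p.2)

-- the flag computed by A's double loop over possible_str
def flagOf (t : List Char) : Int :=
  (PySem.List.pyRange 0 (t.length : Int) 1).foldl (fun flag i =>
    ((PySem.List.pyRange i (t.length : Int) 1).foldl (palSubstep t) ([], flag)).2) 0

-- first loop of A: collect ques_index and k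
def quesOf (t : List Char) : List Int × Int :=
  (PySem.List.pyRange 0 (t.length : Int) 1).foldl (fun p i =>
    if PySem.List.pyGetD t i ' ' = '?' then (p.1 ++ [i], p.2 + 1) else p) ([], 0)

-- itertools.product([0, 1], repeat=k)
def prodBits : Nat → List (List Int)
  | 0 => [[]]
  | n + 1 => [(0 : Int), 1].flatMap (fun x => (prodBits n).map (fun bs => x :: bs))

-- 'for i in range(len(ques_index)): possible_str = ps[:q]+str(b[i])+ps[q+1:]' over zipped (q, b[i])
def substLoop : List Char → List (Int × Int) → List Char
  | ps, [] => ps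
  | ps, (q, bv) :: rest =>
      substLoop (PySem.List.slice ps none (some q) ++ PySem.Int.toChars bv
                 ++ PySem.List.slice ps (some (q + 1)) none) rest

def palindrome_free_strings_brute (N : Int) (S : String) : Bool :=
  let t := S.toList
  let qk := quesOf t
  (prodBits qk.2.toNat).any (fun b => decide (flagOf (substLoop t (qk.1.zip b)) = 0))

-- ===== PORT B =====
def bCands (c : Char) : List Char := if c = '?' then ['0', '1'] else [c]

def bBad5 (w : List Char) : Bool :=
  decide (5 ≤ w.length) && (PySem.List.pyGetD w (-5) ' ' == PySem.List.pyGetD w (-1) ' ')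
    && (PySem.List.pyGetD w (-4) ' ' == PySem.List.pyGetD w (-2) ' ')

def bBad6 (w : List Char) : Bool :=
  decide (6 ≤ w.length) && (PySem.List.pyGetD w 0 ' ' == PySem.List.pyGetD w (-1) ' ')
    && (PySem.List.pyGetD w 1 ' ' == PySem.List.pyGetD w (-2) ' ')
    && (PySem.List.pyGetD w 2 ' ' == PySem.List.pyGetD w (-3) ' ')

-- w[-5:]
def bWin (w : List Char) : List Char := PySem.List.slice w (some (-5)) none

-- one step of the DP: next set of feasible 5-windows
def bStep (states : PySem.Set (List Char)) (c : Char) : PySem.Set (List Char) :=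
  states.foldl (fun nxt st =>
    (bCands c).foldl (fun nxt x =>
      let w := st ++ [x]
      if bBad5 w then nxt
      else if bBad6 w then nxt
      else PySem.Set.add nxt (bWin w)) nxt) PySem.Set.empty

def palindrome_free_strings_brute_alt (N : Int) (S : String) : Bool :=
  !(S.toList.foldl bStep (PySem.Set.ofList [([] : List Char)])).isEmpty

-- ===== PRECONDITION & SPEC =====
def Spec_palindrome_free_strings_brute (N : Int) (S : String) (out : Bool) : Prop := out = palindrome_free_strings_brute_alt N S
instance (N : Int) (S : String) (out : Bool) : Decidable (Spec_palindrome_free_strings_brute N S out) := by unfold Spec_palindrome_free_strings_brute; infer_instance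

-- ===== CLAIM (what is proved, stated in full; the proofs are below) =====
def Claim_equal_palindrome_free_strings_brute : Prop := ∀ (N : Int) (S : String), Dom_palindrome_free_strings_brute N S → Spec_palindrome_free_strings_brute N S (palindrome_free_strings_brute N S)

-- ===== LEMMAS AND PROOFS =====

-- filling relation: f is S with each '?' replaced by '0'/'1' and every other char kept
def fillR : List Char → List Char → Prop
  | [], [] => True
  | [], _ :: _ => False
  | _ :: _, [] => False
  | c :: cs, x :: f => x ∈ bCands c ∧ fillR cs f

def HasPalGe (t : List Char) : Prop := ∃ u, u <:+: t ∧ 5 ≤ u.length ∧ u.reverse = u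
def HasPal56 (t : List Char) : Prop := ∃ u, u <:+: t ∧ (u.length = 5 ∨ u.length = 6) ∧ u.reverse = u

-- ---------- generic fold lemmas ----------
theorem mem_foldl_acc {α σ : Type} (g : List σ → α → List σ) (Q : α → σ → Prop)
    (hg : ∀ s a y, y ∈ g s a ↔ y ∈ s ∨ Q a y) :
    ∀ (l : List α) (init : List σ) (y : σ),
      y ∈ l.foldl g init ↔ y ∈ init ∨ ∃ a ∈ l, Q a y := by
  intro l
  induction l with
  | nil => simp
  | cons a l ih =>
    intro init y
    simp only [List.foldl_cons, ih, hg, List.mem_cons]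
    constructor
    · rintro ((h | h) | ⟨a', ha', h⟩)
      · exact Or.inl h
      · exact Or.inr ⟨a, Or.inl rfl, h⟩
      · exact Or.inr ⟨a', Or.inr ha', h⟩
    · rintro (h | ⟨a', (rfl | ha'), h⟩)
      · exact Or.inl (Or.inl h)
      · exact Or.inl (Or.inr h)
      · exact Or.inr ⟨a', ha', h⟩

-- ---------- B side ----------
theorem mem_bStep (acc : PySem.Set (List Char)) (c : Char) (y : List Char) :
    y ∈ bStep acc c ↔ ∃ s0 ∈ acc, ∃ x ∈ bCands c,
      bBad5 (s0 ++ [x]) = false ∧ bBad6 (s0 ++ [x]) = false ∧ y = bWin (s0 ++ [x]) := by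
  unfold bStep
  rw [mem_foldl_acc _ (fun st y => ∃ x ∈ bCands c,
        bBad5 (st ++ [x]) = false ∧ bBad6 (st ++ [x]) = false ∧ y = bWin (st ++ [x]))]
  · simp [PySem.Set.empty]
  · intro s a y
    rw [mem_foldl_acc _ (fun x y =>
          bBad5 (a ++ [x]) = false ∧ bBad6 (a ++ [x]) = false ∧ y = bWin (a ++ [x]))]
    intro s' x y'
    by_cases h5 : bBad5 (a ++ [x]) = true
    · simp [h5]
    · by_cases h6 : bBad6 (a ++ [x]) = true
      · simp [h5, h6]
      · simp only [Bool.not_eq_true] at h5 h6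
        simp [h5, h6, PySem.Set.mem_add]

def Reach : List Char → List Char → List Char → Prop
  | s0, [], st => st = s0
  | s0, c :: cs, st => ∃ x ∈ bCands c, bBad5 (s0 ++ [x]) = false ∧ bBad6 (s0 ++ [x]) = false ∧
      Reach (bWin (s0 ++ [x])) cs st

theorem foldl_bStep_mem : ∀ (p : List Char) (acc : PySem.Set (List Char)) (st : List Char),
    st ∈ p.foldl bStep acc ↔ ∃ s0 ∈ acc, Reach s0 p st := by
  intro p
  induction p with
  | nil => intro acc st; simp [Reach]
  | cons c cs ih =>
    intro acc st
    simp only [List.foldl_cons, ih, mem_bStep, Reach]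
    constructor
    · rintro ⟨s0, ⟨s1, hs1, x, hx, h5, h6, rfl⟩, hr⟩
      exact ⟨s1, hs1, x, hx, h5, h6, hr⟩
    · rintro ⟨s1, hs1, x, hx, h5, h6, hr⟩
      exact ⟨_, ⟨s1, hs1, x, hx, h5, h6, rfl⟩, hr⟩

def EndBadP (v : List Char) : Prop := ∃ u, u <:+ v ∧ (u.length = 5 ∨ u.length = 6) ∧ u.reverse = u

def Good (u f : List Char) : Prop := ∀ w, w <+: f → w ≠ [] → ¬ EndBadP (u ++ w)

theorem bWin_eq (w : List Char) : bWin w = w.drop (w.length - 5) := by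
  unfold bWin
  rw [PySem.List.slice_from_neg_ofNat w 5 (by omega)]

theorem bWin_append (u : List Char) (x : Char) :
    bWin u ++ [x] = (u ++ [x]).drop ((u ++ [x]).length - 6) := by
  rw [bWin_eq]
  rw [show (u ++ [x]).length = u.length + 1 by simp]
  rw [show u.length + 1 - 6 = u.length - 5 by omega]
  rw [List.drop_append_of_le_length (by omega)]

theorem bWin_comp (u : List Char) (x : Char) :
    bWin (bWin u ++ [x]) = bWin (u ++ [x]) := by
  rw [bWin_eq, bWin_eq, bWin_eq]
  rw [List.drop_append_of_le_length (by simp),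
      List.drop_append_of_le_length (by simp)]
  rw [List.drop_drop]
  congr 1
  simp
  omega

set_option maxHeartbeats 1600000 in
theorem bSmall_iff : ∀ (w : List Char), w.length ≤ 6 →
    ((bBad5 w || bBad6 w) = true ↔ EndBadP w) := by
  have short : ∀ (w : List Char), w.length ≤ 4 → ¬ EndBadP w := by
    rintro w hw ⟨u, hs, hl, -⟩
    have := hs.length_le
    omega
  intro w hw
  match w with
  | [] | [a] | [a, b] | [a, b, c] | [a, b, c, d] =>
    simp only [bBad5, bBad6]
    constructor
    · intro h; revert h; simp
    · intro h; exact absurd h (short _ (by simp))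
  | [a, b, c, d, e] =>
    constructor
    · intro h
      refine ⟨[a, b, c, d, e], List.suffix_refl _, Or.inl rfl, ?_⟩
      simp [bBad5, bBad6, pysem] at h
      simp
      tauto
    · rintro ⟨u, hs, hl, hp⟩
      have hle := hs.length_le
      simp at hle
      have hl5 : u.length = 5 := by omega
      have hu : u = [a, b, c, d, e] := hs.eq_of_length (by simpa using hl5)
      subst hu
      simp at hp
      simp [bBad5, bBad6, pysem]
      tauto
  | [a, b, c, d, e, f] =>
    constructor
    · intro h
      simp [bBad5, bBad6, pysem] at h
      rcases h with h | h
      · exact ⟨[b, c, d, e, f], ⟨[a], rfl⟩, Or.inl rfl, by (simp; tauto)⟩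
      · exact ⟨[a, b, c, d, e, f], List.suffix_refl _, Or.inr rfl, by (simp; tauto)⟩
    · rintro ⟨u, hs, hl, hp⟩
      simp [bBad5, bBad6, pysem]
      rcases hl with hl | hl
      · have hu : u = [b, c, d, e, f] := by
          have := List.suffix_iff_eq_drop.mp hs
          simpa [hl] using this
        subst hu
        simp at hp
        tauto
      · have hu : u = [a, b, c, d, e, f] := hs.eq_of_length (by simpa using hl)
        subst hu
        simp at hp
        tauto

theorem endBad_drop (v : List Char) : EndBadP (v.drop (v.length - 6)) ↔ EndBadP v := by
  constructor
  · rintro ⟨u, hs, hl, hp⟩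
    exact ⟨u, hs.trans (List.drop_suffix _ _), hl, hp⟩
  · rintro ⟨u, hs, hl, hp⟩
    refine ⟨u, ?_, hl, hp⟩
    obtain ⟨pre, rfl⟩ := hs
    rw [List.drop_append_of_le_length (by simp; omega)]
    exact List.suffix_append _ _

theorem badIff (u : List Char) (x : Char) :
    ((bBad5 (bWin u ++ [x]) || bBad6 (bWin u ++ [x])) = true) ↔ EndBadP (u ++ [x]) := by
  rw [bWin_append]
  rw [bSmall_iff _ (by rw [List.length_drop]; omega)]
  exact endBad_drop (u ++ [x])

theorem fillR_nil (f : List Char) : fillR [] f ↔ f = [] := by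
  cases f <;> simp [fillR]

theorem fillR_cons (c : Char) (cs f : List Char) :
    fillR (c :: cs) f ↔ ∃ x f', f = x :: f' ∧ x ∈ bCands c ∧ fillR cs f' := by
  cases f with
  | nil => simp [fillR]
  | cons x f' =>
    simp only [fillR]
    constructor
    · rintro ⟨hx, hf⟩; exact ⟨x, f', rfl, hx, hf⟩
    · rintro ⟨x', f'', h, hx, hf⟩; cases h; exact ⟨hx, hf⟩

theorem good_cons (u : List Char) (x : Char) (f' : List Char) :
    Good u (x :: f') ↔ ¬ EndBadP (u ++ [x]) ∧ Good (u ++ [x]) f' := by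
  constructor
  · intro h
    refine ⟨by simpa using h [x] ⟨f', rfl⟩ (by simp), ?_⟩
    intro w hw hne
    have := h (x :: w) (List.cons_prefix_cons.mpr ⟨rfl, hw⟩) (by simp)
    rw [List.append_cons] at this
    exact this
  · rintro ⟨h1, h2⟩ w hw hne
    cases w with
    | nil => exact absurd rfl hne
    | cons y w' =>
      obtain ⟨rfl, hw'⟩ := List.cons_prefix_cons.mp hw
      by_cases hz : w' = []
      · subst hz; simpa using h1
      · have := h2 w' hw' hz
        rw [List.append_cons]
        exact this

theorem reach_iff : ∀ (p u : List Char),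
    (∃ st, Reach (bWin u) p st) ↔ ∃ f, fillR p f ∧ Good u f := by
  intro p
  induction p with
  | nil =>
    intro u
    constructor
    · intro _; exact ⟨[], by simp [fillR_nil], by rintro w hw hne; simp at hw; exact absurd hw hne⟩
    · intro _; exact ⟨bWin u, rfl⟩
  | cons c cs ih =>
    intro u
    constructor
    · rintro ⟨st, x, hx, h5, h6, hr⟩
      rw [bWin_comp] at hr
      obtain ⟨f', hf', hg⟩ := (ih (u ++ [x])).mp ⟨st, hr⟩
      refine ⟨x :: f', (fillR_cons _ _ _).mpr ⟨x, f', rfl, hx, hf'⟩, ?_⟩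
      rw [good_cons]
      refine ⟨?_, hg⟩
      intro hbad
      have := (badIff u x).mpr hbad
      simp [h5, h6] at this
    · rintro ⟨f, hf, hg⟩
      obtain ⟨x, f', rfl, hx, hf'⟩ := (fillR_cons _ _ _).mp hf
      rw [good_cons] at hg
      obtain ⟨h1, h2⟩ := hg
      have hb : (bBad5 (bWin u ++ [x]) || bBad6 (bWin u ++ [x])) = false := by
        rw [Bool.eq_false_iff]
        intro hbad
        exact h1 ((badIff u x).mp hbad)
      simp only [Bool.or_eq_false_iff] at hb
      obtain ⟨st, hr⟩ := (ih (u ++ [x])).mpr ⟨f', hf', h2⟩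
      rw [← bWin_comp] at hr
      exact ⟨st, x, hx, hb.1, hb.2, hr⟩

theorem good_nil_iff (f : List Char) : Good [] f ↔ ¬ HasPal56 f := by
  constructor
  · rintro h ⟨u, hinf, hl, hp⟩
    obtain ⟨s, tl, hh⟩ := hinf
    subst hh
    have hw : (s ++ u) <+: s ++ u ++ tl := ⟨tl, rfl⟩
    have hne : s ++ u ≠ [] := by
      intro hh
      simp only [List.append_eq_nil_iff] at hh
      rcases hl with hl | hl <;> simp [hh.2] at hl
    exact h (s ++ u) hw hne ⟨u, by simp [List.suffix_append], hl, hp⟩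
  · rintro h w hw hne ⟨u, hs, hl, hp⟩
    simp only [List.nil_append] at hs
    exact h ⟨u, hs.isInfix.trans hw.isInfix, hl, hp⟩

-- ---------- A side ----------
def quesIdx (t : List Char) : List Nat :=
  (List.range t.length).filter (fun i => t.getD i ' ' == '?')

def bitChar (b : Int) : Char := if b = 0 then '0' else '1'

def fillQ : List Char → List Char → List Char
  | [], _ => []
  | c :: cs, ds =>
    if c = '?' then
      match ds with
      | [] => c :: fillQ cs []
      | d :: ds' => d :: fillQ cs ds'
    else c :: fillQ cs ds

def aCond (t : List Char) (i k : Nat) : Bool :=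
  decide (5 ≤ ((t.drop i).take (k + 1)).length) && checkPalindromeBrute ((t.drop i).take (k + 1))

theorem cpbGo_iff (S : List Char) : ∀ (l : List Char) (j : Int),
    cpbGo S l j = true ↔ ∀ (k : Nat) (h : k < l.length), PySem.List.pyGet? S (j - k) = some l[k] := by
  intro l
  induction l with
  | nil => intro j; simp [cpbGo]
  | cons i rest ih =>
    intro j
    rcases heq : PySem.List.pyGet? S j with _ | c
    · simp only [cpbGo, heq]
      constructor
      · intro h; exact absurd h (by simp)
      · intro h
        have := h 0 (by simp)
        simp [heq] at this
    · simp only [cpbGo, heq]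
      by_cases hic : i = c
      · subst hic
        rw [if_neg (by simp)]
        rw [ih (j - 1)]
        constructor
        · intro h k hk
          cases k with
          | zero => simpa using heq
          | succ k' =>
            have := h k' (by simpa using hk)
            rw [show j - 1 - (k' : Int) = j - ((k' : Nat) + 1 : Nat) by push_cast; ring] at this
            simpa using this
        · intro h k hk
          have := h (k + 1) (by simpa using hk)
          rw [show j - ((k : Nat) + 1 : Nat) = j - 1 - (k : Int) by push_cast; ring] at this
          simpa using this
      · rw [if_pos hic]
        constructor
        · intro h; exact absurd h (by simp)
        · intro h
          have := h 0 (by simp)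
          simp [heq] at this
          exact absurd this.symm hic

theorem checkPal_iff (u : List Char) : checkPalindromeBrute u = true ↔ u.reverse = u := by
  unfold checkPalindromeBrute
  rw [cpbGo_iff]
  constructor
  · intro h
    apply List.ext_getElem (by simp)
    intro k hk hk'
    have hkl : k < u.length := hk'
    have := h k hkl
    rw [show ((u.length : Int) - 1 - (k : Int)) = ((u.length - 1 - k : Nat) : Int) by omega] at this
    rw [PySem.List.pyGet?_natCast] at this
    rw [List.getElem?_eq_getElem (by omega)] at this
    rw [List.getElem_reverse]
    exact Option.some.inj this
  · intro h k hk
    have hrev : u[u.length - 1 - k] = u[k] := by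
      have h2 := List.getElem_reverse (l := u) (i := k) (by simpa using hk)
      calc u[u.length - 1 - k] = u.reverse[k]'(by simpa using hk) := h2.symm
        _ = u[k] := by simp only [h]
    rw [show ((u.length : Int) - 1 - (k : Int)) = ((u.length - 1 - k : Nat) : Int) by omega]
    rw [PySem.List.pyGet?_natCast]
    rw [List.getElem?_eq_getElem (by omega)]
    rw [hrev]

theorem flag_fold (C : Nat → Bool) : ∀ (l : List Nat) (fl : Int),
    l.foldl (fun fl i => if C i then 1 else fl) fl = if l.any C then 1 else fl := by
  intro l
  induction l with
  | nil => intro fl; simp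
  | cons a l ih =>
    intro fl
    by_cases h : C a = true <;> simp [h, ih]

theorem inner_char (t : List Char) (i : Nat) (hi : i ≤ t.length) :
    ∀ (m : Nat), i ≤ m → m ≤ t.length → ∀ (fl : Int),
    ((PySem.List.pyRange (i : Int) (m : Int) 1).foldl (palSubstep t) ([], fl)) =
      ((t.drop i).take (m - i), if (List.range (m - i)).any (aCond t i) then 1 else fl) := by
  intro m hm
  induction m, hm using Nat.le_induction with
  | base =>
    intro _ fl
    rw [PySem.List.pyRange_one_eq_nil (by omega)]
    simp
  | succ m hm ih =>
    intro hml fl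
    rw [show ((m + 1 : Nat) : Int) = ((m : Nat) : Int) + 1 by push_cast; ring]
    rw [PySem.List.pyRange_one_succ_right (by exact_mod_cast hm)]
    rw [List.foldl_append]
    rw [ih (by omega) fl]
    have hml' : m < t.length := by omega
    have hsub : (t.drop i).take (m - i) ++ [PySem.List.pyGetD t (m : Int) ' ']
        = (t.drop i).take (m + 1 - i) := by
      rw [PySem.List.pyGetD_natCast]
      rw [List.getD_eq_getElem _ _ hml']
      rw [show m + 1 - i = (m - i) + 1 by omega]
      rw [List.take_add_one]
      congr 1
      rw [List.getElem?_eq_getElem (by simp; omega)]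
      simp only [Option.toList_some]
      congr 1
      rw [List.getElem_drop]
      congr 1
      omega
    simp only [palSubstep, List.foldl_cons, List.foldl_nil, hsub]
    rw [show m + 1 - i = (m - i) + 1 by omega]
    rw [List.range_succ, List.any_append]
    by_cases hc : (5 ≤ ((t.drop i).take (m - i + 1)).length ∧
        checkPalindromeBrute ((t.drop i).take (m - i + 1)) = true)
    · rw [if_pos hc]
      have ha : aCond t i (m - i) = true := by
        simp only [aCond, Bool.and_eq_true, decide_eq_true_eq]
        exact ⟨hc.1, hc.2⟩
      simp [ha]
    · rw [if_neg hc]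
      have ha : aCond t i (m - i) = false := by
        simp only [aCond]
        rw [Bool.and_eq_false_iff]
        by_cases h5 : 5 ≤ ((t.drop i).take (m - i + 1)).length
        · right; rw [Bool.eq_false_iff]; intro hcp; exact hc ⟨h5, hcp⟩
        · left; simpa using h5
      simp [ha]

theorem flag_char (t : List Char) :
    flagOf t = if (List.range t.length).any
        (fun i => (List.range (t.length - i)).any (aCond t i)) then 1 else 0 := by
  unfold flagOf
  rw [PySem.List.pyRange_zero_natCast]
  rw [List.foldl_map]
  have hcong : List.foldl (fun x (y : Nat) =>
        (List.foldl (palSubstep t) ([], x) (PySem.List.pyRange (y : Int) (t.length : Int) 1)).2)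
        0 (List.range t.length)
      = List.foldl (fun fl (i : Nat) =>
          if (List.range (t.length - i)).any (aCond t i) then 1 else fl) 0 (List.range t.length) := by
    apply PySem.List.foldl_congr_mem
    intro acc x hx
    rw [inner_char t x (by simp at hx; omega) t.length (by simp at hx; omega) le_rfl acc]
  rw [hcong]
  exact flag_fold _ (List.range t.length) 0

theorem any_iff (t : List Char) :
    (List.range t.length).any (fun i => (List.range (t.length - i)).any (aCond t i)) = true
      ↔ HasPalGe t := by
  simp only [List.any_eq_true, List.mem_range]
  constructor
  · rintro ⟨i, hi, k, hk, hc⟩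
    simp only [aCond, Bool.and_eq_true, decide_eq_true_eq] at hc
    refine ⟨(t.drop i).take (k + 1), ?_, hc.1, (checkPal_iff _).mp hc.2⟩
    exact ((t.drop i).take_prefix (k + 1)).isInfix.trans (t.drop_suffix i).isInfix
  · rintro ⟨u, hinf, h5, hpal⟩
    obtain ⟨s, hus, hst⟩ := List.infix_iff_prefix_suffix.mp hinf
    obtain ⟨pre, rfl⟩ := hst
    have hsdrop : (pre ++ s).drop pre.length = s := by simp
    have hu : u = s.take u.length := List.prefix_iff_eq_take.mp hus
    have hul : u.length ≤ s.length := hus.length_le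
    refine ⟨pre.length, by simp; omega, u.length - 1, by simp; omega, ?_⟩
    simp only [aCond, Bool.and_eq_true, decide_eq_true_eq]
    rw [show u.length - 1 + 1 = u.length by omega]
    rw [hsdrop, ← hu]
    exact ⟨h5, (checkPal_iff _).mpr hpal⟩

theorem flag_iff (t : List Char) : flagOf t = 0 ↔ ¬ HasPalGe t := by
  rw [flag_char]
  by_cases h : (List.range t.length).any
      (fun i => (List.range (t.length - i)).any (aCond t i)) = true
  · rw [if_pos h]
    exact iff_of_false (by norm_num) (by simpa using (any_iff t).mp h)
  · rw [if_neg h]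
    refine iff_of_true rfl ?_
    intro hp
    exact h ((any_iff t).mpr hp)

theorem quesOf_eq (t : List Char) :
    quesOf t = ((quesIdx t).map (fun n : Nat => (n : Int)), ((quesIdx t).length : Int)) := by
  unfold quesOf quesIdx
  rw [PySem.List.pyRange_zero_natCast, List.foldl_map]
  have key : ∀ n : Nat, (List.range n).foldl
      (fun p (i : Nat) => if PySem.List.pyGetD t ((i : Nat) : Int) ' ' = '?'
        then (p.1 ++ [((i : Nat) : Int)], p.2 + 1) else p) ([], 0)
      = ((((List.range n).filter (fun i => t.getD i ' ' == '?')).map (fun n : Nat => (n : Int))),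
         ((((List.range n).filter (fun i => t.getD i ' ' == '?'))).length : Int)) := by
    intro n
    induction n with
    | zero => simp
    | succ n ihn =>
      rw [List.range_succ, List.foldl_append, ihn, List.filter_append]
      by_cases hc : t.getD n ' ' = '?' <;>
        · simp only [List.getD] at hc
          simp [hc]
  exact key t.length

theorem ques_cons (c : Char) (cs : List Char) :
    quesIdx (c :: cs) = (if c = '?' then [0] else []) ++ (quesIdx cs).map (· + 1) := by
  unfold quesIdx
  rw [show (c :: cs).length = cs.length + 1 by simp]
  rw [List.range_succ_eq_map, List.filter_cons, List.filter_map]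
  by_cases hc : c = '?'
  · simp [hc, Function.comp_def, Nat.succ_eq_add_one]
  · simp [hc, Function.comp_def, Nat.succ_eq_add_one]

theorem subst_shift : ∀ (ps : List (Int × Int)) (c : Char) (t : List Char),
    (∀ p ∈ ps, 0 ≤ p.1) →
    substLoop (c :: t) (ps.map (fun p => (p.1 + 1, p.2))) = c :: substLoop t ps := by
  intro ps
  induction ps with
  | nil => intro c t _; rfl
  | cons p rest ih =>
    intro c t h
    obtain ⟨q, bv⟩ := p
    have hq : (0 : Int) ≤ q := h (q, bv) (by simp)
    simp only [List.map_cons, substLoop]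
    have e1 : PySem.List.slice (c :: t) none (some (q + 1)) = (c :: t).take (q + 1).toNat :=
      PySem.List.slice_to _ (by omega)
    have e2 : PySem.List.slice (c :: t) (some (q + 1 + 1)) none = (c :: t).drop (q + 1 + 1).toNat :=
      PySem.List.slice_from _ (by omega)
    have e3 : PySem.List.slice t none (some q) = t.take q.toNat :=
      PySem.List.slice_to _ (by omega)
    have e4 : PySem.List.slice t (some (q + 1)) none = t.drop (q + 1).toNat :=
      PySem.List.slice_from _ (by omega)
    rw [e1, e2, e3, e4]
    rw [show (q + 1).toNat = q.toNat + 1 by omega, show (q + 1 + 1).toNat = (q.toNat + 1) + 1 by omega]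
    rw [List.take_succ_cons, List.drop_succ_cons]
    rw [show (c :: List.take q.toNat t) ++ PySem.Int.toChars bv ++ List.drop (q.toNat + 1) t
        = c :: (List.take q.toNat t ++ PySem.Int.toChars bv ++ List.drop (q.toNat + 1) t) by simp]
    exact ih c _ (fun p hp => h p (List.mem_cons_of_mem _ hp))

theorem subst_eq : ∀ (t : List Char) (bits : List Int),
    (∀ b ∈ bits, b = 0 ∨ b = 1) → bits.length = (quesIdx t).length →
    substLoop t (((quesIdx t).map (fun n : Nat => (n : Int))).zip bits)
      = fillQ t (bits.map bitChar) := by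
  have toChars01 : ∀ b : Int, b = 0 ∨ b = 1 → PySem.Int.toChars b = [bitChar b] := by
    rintro b (rfl | rfl) <;> rfl
  have shift_form : ∀ (qs : List Nat) (bs : List Int) (c : Char) (u : List Char),
      substLoop (c :: u) (((qs.map (· + 1)).map (fun n : Nat => (n : Int))).zip bs)
        = c :: substLoop u ((qs.map (fun n : Nat => (n : Int))).zip bs) := by
    intro qs bs c u
    have h1 : (qs.map (· + 1)).map (fun n : Nat => (n : Int))
        = (qs.map (fun n : Nat => (n : Int))).map (fun i => i + 1) := by
      simp [List.map_map, Function.comp_def]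
    rw [h1, List.zip_map_left]
    rw [show ((qs.map (fun n : Nat => (n : Int))).zip bs).map (Prod.map (fun i => i + 1) id)
        = ((qs.map (fun n : Nat => (n : Int))).zip bs).map (fun p => (p.1 + 1, p.2)) by
      apply List.map_congr_left; intro p _; rfl]
    apply subst_shift
    intro p hp
    have := (List.of_mem_zip hp).1
    simp at this
    obtain ⟨n, -, hn⟩ := this
    omega
  intro t
  induction t with
  | nil => intro bits _ _; rfl
  | cons c cs ih =>
    intro bits h01 hlen
    rw [ques_cons] at hlen ⊢
    by_cases hc : c = '?'
    · rw [if_pos hc] at hlen ⊢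
      subst hc
      cases bits with
      | nil => simp at hlen
      | cons b bs =>
        simp only [List.cons_append, List.nil_append, List.map_cons, List.zip_cons_cons,
          substLoop, Nat.cast_zero]
        have e1 : PySem.List.slice ('?' :: cs) none (some 0) = ('?' :: cs).take ((0 : Int)).toNat :=
          PySem.List.slice_to _ (by omega)
        have e2 : PySem.List.slice ('?' :: cs) (some ((0 : Int) + 1)) none
            = ('?' :: cs).drop ((0 : Int) + 1).toNat :=
          PySem.List.slice_from _ (by omega)
        rw [e1, e2]
        rw [show ((0 : Int)).toNat = 0 by rfl, show ((0 : Int) + 1).toNat = 1 by rfl]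
        try rw [List.take_zero]
        try rw [List.drop_one]
        try rw [List.tail_cons]
        try rw [List.nil_append]
        rw [toChars01 b (h01 b (by simp))]
        try rw [List.singleton_append]
        rw [shift_form]
        rw [ih bs (fun x hx => h01 x (by simp [hx])) (by simp at hlen; omega)]
        rfl
    · rw [if_neg hc] at hlen ⊢
      rw [List.nil_append] at hlen ⊢
      rw [shift_form]
      rw [ih bits h01 (by simpa using hlen)]
      simp only [fillQ, if_neg hc]

theorem prodBits_mem : ∀ (k : Nat) (bs : List Int),
    bs ∈ prodBits k ↔ bs.length = k ∧ ∀ x ∈ bs, x = 0 ∨ x = 1 := by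
  intro k
  induction k with
  | zero =>
    intro bs
    simp only [prodBits, List.mem_singleton]
    constructor
    · rintro rfl; simp
    · rintro ⟨hlen, -⟩; exact List.length_eq_zero_iff.mp hlen
  | succ k ihk =>
    intro bs
    simp only [prodBits, List.mem_flatMap, List.mem_map]
    constructor
    · rintro ⟨x, hx, a, ha, rfl⟩
      obtain ⟨hlen, h01⟩ := (ihk a).mp ha
      refine ⟨by simp [hlen], ?_⟩
      intro y hy
      rcases List.mem_cons.mp hy with rfl | hy'
      · simpa using hx
      · exact h01 y hy'
    · rintro ⟨hlen, h01⟩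
      cases bs with
      | nil => simp at hlen
      | cons x a =>
        refine ⟨x, by simpa using h01 x (by simp), a,
          (ihk a).mpr ⟨by simpa using hlen, fun y hy => h01 y (by simp [hy])⟩, rfl⟩

theorem fillR_iff : ∀ (t f : List Char),
    fillR t f ↔ ∃ bits : List Int, bits.length = (quesIdx t).length ∧
      (∀ b ∈ bits, b = 0 ∨ b = 1) ∧ f = fillQ t (bits.map bitChar) := by
  intro t
  induction t with
  | nil =>
    intro f
    rw [fillR_nil]
    constructor
    · rintro rfl; exact ⟨[], by simp [quesIdx], by simp, rfl⟩
    · rintro ⟨bits, hlen, -, rfl⟩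
      simp [quesIdx] at hlen
      simp [fillQ]
  | cons c cs ih =>
    intro f
    rw [fillR_cons, ques_cons]
    by_cases hc : c = '?'
    · rw [if_pos hc]
      subst hc
      constructor
      · rintro ⟨x, f', rfl, hx, hf'⟩
        obtain ⟨bits, hlen, h01, rfl⟩ := (ih f').mp hf'
        simp [bCands] at hx
        refine ⟨(if x = '0' then 0 else 1) :: bits, by simp [hlen], ?_, ?_⟩
        · intro b hb
          rcases List.mem_cons.mp hb with rfl | hb'
          · by_cases hx0 : x = '0' <;> simp [hx0]
          · exact h01 b hb'
        · have hbx : bitChar (if x = '0' then 0 else 1) = x := by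
            rcases hx with rfl | rfl <;> decide
          simp only [List.map_cons, hbx]
          simp [fillQ]
      · rintro ⟨bits, hlen, h01, rfl⟩
        cases bits with
        | nil => simp at hlen
        | cons b bs =>
          refine ⟨bitChar b, fillQ cs (bs.map bitChar), ?_, ?_, ?_⟩
          · simp only [List.map_cons]
            simp [fillQ]
          · simp only [bCands]
            rcases h01 b (by simp) with rfl | rfl <;> simp [bitChar]
          · exact (ih _).mpr ⟨bs, by simp at hlen; omega,
              fun y hy => h01 y (by simp [hy]), rfl⟩
    · rw [if_neg hc]
      constructor
      · rintro ⟨x, f', rfl, hx, hf'⟩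
        obtain ⟨bits, hlen, h01, rfl⟩ := (ih f').mp hf'
        simp only [bCands, if_neg hc, List.mem_singleton] at hx
        subst hx
        refine ⟨bits, by simpa using hlen, h01, ?_⟩
        simp only [fillQ, if_neg hc]
      · rintro ⟨bits, hlen, h01, rfl⟩
        refine ⟨c, fillQ cs (bits.map bitChar), ?_, by simp [bCands, if_neg hc], ?_⟩
        · simp only [fillQ, if_neg hc]
        · exact (ih _).mpr ⟨bits, by simpa using hlen, h01, rfl⟩

theorem a_iff (t : List Char) :
    ((prodBits (quesOf t).2.toNat).any (fun b => decide (flagOf (substLoop t ((quesOf t).1.zip b)) = 0))) = true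
      ↔ ∃ f, fillR t f ∧ ¬ HasPalGe f := by
  rw [quesOf_eq]
  simp only [Int.toNat_natCast]
  rw [List.any_eq_true]
  constructor
  · rintro ⟨b, hb, hflag⟩
    simp only [decide_eq_true_eq] at hflag
    obtain ⟨hlen, h01⟩ := (prodBits_mem _ b).mp hb
    rw [subst_eq t b h01 hlen] at hflag
    exact ⟨fillQ t (b.map bitChar), (fillR_iff t _).mpr ⟨b, hlen, h01, rfl⟩, (flag_iff _).mp hflag⟩
  · rintro ⟨f, hf, hp⟩
    obtain ⟨bits, hlen, h01, rfl⟩ := (fillR_iff t f).mp hf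
    refine ⟨bits, (prodBits_mem _ bits).mpr ⟨hlen, h01⟩, ?_⟩
    simp only [decide_eq_true_eq]
    rw [subst_eq t bits h01 hlen]
    exact (flag_iff _).mpr hp

theorem b_iff (t : List Char) :
    (!(t.foldl bStep (PySem.Set.ofList [([] : List Char)])).isEmpty) = true
      ↔ ∃ f, fillR t f ∧ ¬ HasPal56 f := by
  have h1 : (!(t.foldl bStep (PySem.Set.ofList [([] : List Char)])).isEmpty) = true ↔
      ∃ st, st ∈ t.foldl bStep (PySem.Set.ofList [([] : List Char)]) := by
    rw [Bool.not_eq_true', ← Bool.not_eq_true]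
    simp [List.isEmpty_iff, List.eq_nil_iff_forall_not_mem]
  rw [h1]
  have hof : PySem.Set.ofList [([] : List Char)] = [([] : List Char)] := rfl
  simp only [hof, foldl_bStep_mem, List.mem_singleton]
  have hwin : bWin ([] : List Char) = [] := rfl
  constructor
  · rintro ⟨st, s0, rfl, hr⟩
    have : ∃ st, Reach (bWin ([] : List Char)) t st := ⟨st, by rwa [hwin]⟩
    obtain ⟨f, hf, hg⟩ := (reach_iff t []).mp this
    exact ⟨f, hf, (good_nil_iff f).mp hg⟩
  · rintro ⟨f, hf, hp⟩
    obtain ⟨st, hr⟩ := (reach_iff t []).mpr ⟨f, hf, (good_nil_iff f).mpr hp⟩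
    exact ⟨st, [], rfl, by rwa [hwin] at hr⟩

theorem pal_shrink (f : List Char) : ∀ (n : Nat) (u : List Char), u.length = n →
    u <:+: f → 5 ≤ u.length → u.reverse = u → HasPal56 f := by
  intro n
  induction n using Nat.strong_induction_on with
  | _ n ih =>
    intro u hlen hinf h5 hpal
    by_cases h6 : u.length ≤ 6
    · exact ⟨u, hinf, by omega, hpal⟩
    · cases u with
      | nil => simp at h5
      | cons a t =>
        rcases t.eq_nil_or_concat with rfl | ⟨m, b, hmb⟩
        · simp at h6
        · rw [List.concat_eq_append] at hmb
          subst hmb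
          have hminf : m <:+: (a :: (m ++ [b])) := ⟨[a], [b], rfl⟩
          have hrev : (a :: (m ++ [b])).reverse = b :: (m.reverse ++ [a]) := by simp
          rw [hrev] at hpal
          injection hpal with hba hrest
          have hm : m.reverse = m := by
            subst hba
            exact List.append_inj_left' hrest (by simp)
          simp at hlen h6
          exact ih (n - 2) (by omega) m (by omega) (hminf.trans hinf) (by omega) hm

theorem pq (f : List Char) : HasPalGe f ↔ HasPal56 f := by
  constructor
  · rintro ⟨u, hinf, h5, hpal⟩
    exact pal_shrink f u.length u rfl hinf h5 hpal
  · rintro ⟨u, hinf, hl, hpal⟩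
    exact ⟨u, hinf, by omega, hpal⟩

-- ===== VERDICT (by name: the statement is the Claim_ definition above) =====
theorem palindrome_free_strings_brute_spec : Claim_equal_palindrome_free_strings_brute := by
  intro N S _
  unfold Spec_palindrome_free_strings_brute palindrome_free_strings_brute palindrome_free_strings_brute_alt
  rw [Bool.eq_iff_iff]
  have hmid : (∃ f, fillR S.toList f ∧ ¬ HasPalGe f) ↔ ∃ f, fillR S.toList f ∧ ¬ HasPal56 f := by
    constructor
    · rintro ⟨f, hf, hp⟩; exact ⟨f, hf, fun h => hp ((pq f).mpr h)⟩
    · rintro ⟨f, hf, hp⟩; exact ⟨f, hf, fun h => hp ((pq f).mp h)⟩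
  exact ((a_iff S.toList).trans (hmid.trans (b_iff S.toList).symm))
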